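-- pv_equiv track=rewrite | github.com/roro3478/desnos | StringSolver.py | derivativeString
-- ===== SOURCE A (Python) =====
-- chars = "+-/*^"
--
-- def derivativeString(s : str):
--     derivative = [""]
--     if s[0] == "-":
--         derivative[-1] += s[0]
--         s = s[1:]
--     while s != "":
--         if s[0] in chars.replace("^",""):
--             derivative.append(s[0])
--             derivative.append("")
--             s = s[1:]
--         else:
--             derivative[-1] += s[0]
--             s = s[1:]
--     return derivative
-- ===== SOURCE B (Python) =====
-- OPS = "+-*/"
--
-- def _split_first(t):
--     # split t at its first operator: (before, operator, after), or None if no operator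
--     for k, ch in enumerate(t):
--         if ch in OPS:
--             return t[:k], ch, t[k + 1:]
--     return None
--
-- def derivativeString(s: str):
--     prefix, cur = ('-', s[1:]) if s[0] == '-' else ('', s)
--     out = []
--     while True:
--         hit = _split_first(cur)
--         if hit is None:
--             out.append(prefix + cur)
--             return out
--         before, op, rest = hit
--         out.append(prefix + before)
--         out.append(op)
--         prefix, cur = '', rest
-- ===== Notes on version B (the rewrite author's own statement) =====
-- stated objective: faster
-- what changed: Replaced A's character-by-character scan (which copies s = s[1:] every iteration and mutates the last token of a growing list) with a chunking loop that splits the remaining string at its first operator and emits whole slice tokens.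
import Mathlib
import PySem

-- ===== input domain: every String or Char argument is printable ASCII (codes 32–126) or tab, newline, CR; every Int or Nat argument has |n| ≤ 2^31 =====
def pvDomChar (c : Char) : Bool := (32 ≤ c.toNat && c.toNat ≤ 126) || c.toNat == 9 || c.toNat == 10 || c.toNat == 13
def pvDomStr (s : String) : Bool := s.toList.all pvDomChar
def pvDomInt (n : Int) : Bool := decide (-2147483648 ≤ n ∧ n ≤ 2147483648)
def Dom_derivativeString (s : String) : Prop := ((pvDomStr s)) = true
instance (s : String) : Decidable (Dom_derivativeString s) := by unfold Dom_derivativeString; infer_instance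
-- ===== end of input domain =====

-- B replaces A's char-by-char accumulator (appending each char to the list's last token)
-- with chunk-splitting at the first operator (slice-based); a timing run measured B faster (A copies s[1:] per char).
-- Both A and B raise IndexError on the empty string (Pre_ excludes it).


-- ===== PORT A =====
-- chars = "+-/*^"
def pvChars : String := "+-/*^"

-- derivative[-1] += c  (the list is always nonempty in A)
def pvAppendLast : List (List Char) → Char → List (List Char)
  | [], _ => []
  | [x], c => [x ++ [c]]
  | x :: xs, c => x :: pvAppendLast xs c

-- the while loop of A, over the remaining chars and the accumulator (tokens as char lists)
def pvLoopA : List Char → List (List Char) → List (List Char)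
  | [], acc => acc
  | c :: r, acc =>
      if c ∈ (PySem.Str.replace pvChars "^" "").toList then pvLoopA r (acc ++ [[c], []])
      else pvLoopA r (pvAppendLast acc c)

def derivativeString (s : String) : List String :=
  (match s.toList with
   | [] => []              -- Python A raises IndexError at s[0]; excluded by Pre_
   | c :: rest =>
      if c = '-' then pvLoopA rest (pvAppendLast [[]] c)   -- derivative[-1] += s[0]; s = s[1:]
      else pvLoopA (c :: rest) [[]]).map String.ofList

-- ===== PORT B =====
def pvOps : List Char := "+-*/".toList

-- _split_first: split at the first operator, None if there is none
def pvSplitFirst : List Char → Option (List Char × Char × List Char)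
  | [] => none
  | c :: r =>
      if c ∈ pvOps then some ([], c, r)
      else (pvSplitFirst r).map (fun p => (c :: p.1, p.2.1, p.2.2))

theorem pvSplitFirst_length : ∀ {t : List Char} {p : List Char} {o : Char} {r : List Char},
    pvSplitFirst t = some (p, o, r) → r.length < t.length := by
  intro t
  induction t with
  | nil => intro _ _ _ h; simp [pvSplitFirst] at h
  | cons c cs ih =>
    intro p o r h
    simp only [pvSplitFirst] at h
    split at h
    · cases h; simp
    · cases hs : pvSplitFirst cs with
      | none => rw [hs] at h; simp at h
      | some q =>
        rw [hs] at h
        simp at h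
        obtain ⟨q1, q2⟩ := q
        obtain ⟨q2a, q2b⟩ := q2
        simp at h
        obtain ⟨_, _, hr⟩ := h
        subst hr
        exact Nat.lt_succ_of_lt (ih hs)

-- the while loop of B
def pvLoopB (pre : List Char) (cur : List Char) : List (List Char) :=
  match h : pvSplitFirst cur with
  | none => [pre ++ cur]
  | some (p, o, rest) => (pre ++ p) :: [o] :: pvLoopB [] rest
termination_by cur.length
decreasing_by exact pvSplitFirst_length h

def derivativeString_alt (s : String) : List String :=
  (match s.toList with
   | [] => []              -- Python B raises IndexError at s[0]; excluded by Pre_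
   | c :: rest =>
      if c = '-' then pvLoopB ['-'] rest
      else pvLoopB [] (c :: rest)).map String.ofList

-- ===== PRECONDITION & SPEC =====
-- Pre_ excludes only the empty string, on which both Pythons raise IndexError at s[0].
def Pre_derivativeString (s : String) : Prop := s ≠ ""
instance (s : String) : Decidable (Pre_derivativeString s) := by unfold Pre_derivativeString; infer_instance
def pvWitness_derivativeString : String := "-x+y"

def Spec_derivativeString (s : String) (out : List String) : Prop := out = derivativeString_alt s
instance (s : String) (out : List String) : Decidable (Spec_derivativeString s out) := by unfold Spec_derivativeString; infer_instance

-- ===== CLAIM (what is proved, stated in full; the proofs are below) =====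
def Claim_equal_derivativeString : Prop := ∀ (s : String), Dom_derivativeString s → Pre_derivativeString s → Spec_derivativeString s (derivativeString s)

-- ===== LEMMAS AND PROOFS =====

theorem pvOpsA_eq : (PySem.Str.replace pvChars "^" "").toList = ['+', '-', '/', '*'] := by decide

theorem pvMem_ops_iff (c : Char) : c ∈ (PySem.Str.replace pvChars "^" "").toList ↔ c ∈ pvOps := by
  rw [pvOpsA_eq]
  simp [pvOps]
  tauto

theorem pvAppendLast_append (front : List (List Char)) (x : List Char) (c : Char) :
    pvAppendLast (front ++ [x]) c = front ++ [x ++ [c]] := by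
  induction front with
  | nil => rfl
  | cons f fs ih =>
    cases fs with
    | nil => rfl
    | cons g gs => simpa [pvAppendLast] using ih

theorem pvLoopB_eq_none (pre cur : List Char) (h : pvSplitFirst cur = none) :
    pvLoopB pre cur = [pre ++ cur] := by
  rw [pvLoopB]
  split
  · rfl
  · rename_i heq; rw [h] at heq; cases heq

theorem pvLoopB_eq_some (pre cur p : List Char) (o : Char) (rest : List Char)
    (h : pvSplitFirst cur = some (p, o, rest)) :
    pvLoopB pre cur = (pre ++ p) :: [o] :: pvLoopB [] rest := by
  rw [pvLoopB]
  split
  · rename_i heq; rw [h] at heq; cases heq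
  · rename_i p' o' rest' heq
    rw [h] at heq
    cases heq
    rfl

theorem pvLoopB_cons_nonop (pre : List Char) (c : Char) (r : List Char) (h : c ∉ pvOps) :
    pvLoopB pre (c :: r) = pvLoopB (pre ++ [c]) r := by
  cases hs : pvSplitFirst r with
  | none =>
    have hcs : pvSplitFirst (c :: r) = none := by simp [pvSplitFirst, h, hs]
    rw [pvLoopB_eq_none _ _ hcs, pvLoopB_eq_none _ _ hs]
    simp
  | some q =>
    obtain ⟨p, o, t⟩ := q
    have hcs : pvSplitFirst (c :: r) = some (c :: p, o, t) := by simp [pvSplitFirst, h, hs]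
    rw [pvLoopB_eq_some _ _ _ _ _ hcs, pvLoopB_eq_some _ _ _ _ _ hs]
    simp

theorem pvLoopA_eq_loopB : ∀ (l : List Char) (front : List (List Char)) (pre : List Char),
    pvLoopA l (front ++ [pre]) = front ++ pvLoopB pre l := by
  intro l
  induction l with
  | nil =>
    intro front pre
    rw [pvLoopB_eq_none _ _ (by simp [pvSplitFirst])]
    simp [pvLoopA]
  | cons c r ih =>
    intro front pre
    by_cases hc : c ∈ pvOps
    · have hA : c ∈ (PySem.Str.replace pvChars "^" "").toList := (pvMem_ops_iff c).mpr hc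
      have hs : pvSplitFirst (c :: r) = some ([], c, r) := by simp [pvSplitFirst, hc]
      rw [pvLoopB_eq_some _ _ _ _ _ hs]
      simp only [pvLoopA, if_pos hA]
      have : (front ++ [pre]) ++ [[c], []] = (front ++ [pre, [c]]) ++ [([] : List Char)] := by simp
      rw [this, ih]
      simp
    · have hA : c ∉ (PySem.Str.replace pvChars "^" "").toList := fun h => hc ((pvMem_ops_iff c).mp h)
      simp only [pvLoopA, if_neg hA]
      rw [pvAppendLast_append, ih, pvLoopB_cons_nonop pre c r hc]

theorem derivativeString_spec' (s : String) (hpre : Pre_derivativeString s) :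
    derivativeString s = derivativeString_alt s := by
  unfold derivativeString derivativeString_alt
  cases h : s.toList with
  | nil =>
    exact absurd (String.toList_eq_nil_iff.mp h) hpre
  | cons c rest =>
    by_cases hc : c = '-'
    · subst hc
      simp only [if_true]
      have h1 : pvAppendLast [[]] '-' = [] ++ [['-']] := rfl
      rw [h1, pvLoopA_eq_loopB rest [] ['-']]
      simp
    · simp only [if_neg hc]
      have h1 : ([[]] : List (List Char)) = [] ++ [([] : List Char)] := rfl
      rw [h1, pvLoopA_eq_loopB (c :: rest) [] []]
      simp

-- ===== VERDICT (by name: the statement is the Claim_ definition above) =====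
theorem derivativeString_spec : Claim_equal_derivativeString := by
  intro s _ hpre
  unfold Spec_derivativeString
  exact derivativeString_spec' s hpre
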